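-- pv_equiv track=rewrite | github.com/cantbloom/comm.prod | cron/utils.py | strip_old
-- ===== SOURCE A (Python) =====
-- def strip_old(query):
--   """
--       shitty hack
--   """
--   strip_params = [
--       "---------- Forwarded message ----------",
--       "-----Original message-----",
--       "wrote:",
--       "________________________________________",
--       'Quoting',
--       '\r\n>',
--       '\n>',
--       'From:',
--   ]
--   if query is not None:
--     for param in strip_params:
--       query = query.split(param)[0]
--     # if there is not newline at the end,
--     # add it to pick up the commprod
--     query += "\n"
--     return query
-- ===== SOURCE B (Python) =====
-- def strip_old(query):
--   """
--       shitty hack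
--   """
--   strip_params = [
--       "---------- Forwarded message ----------",
--       "-----Original message-----",
--       "wrote:",
--       "________________________________________",
--       'Quoting',
--       '\r\n>',
--       '\n>',
--       'From:',
--   ]
--   if query is None:
--     return None
--   cut = len(query)
--   for param in strip_params:
--     i = query.find(param)
--     if i != -1 and i < cut:
--       cut = i
--   return query[:cut] + "\n"
-- ===== Notes on version B (the rewrite author's own statement) =====
-- stated objective: simpler
-- what changed: Instead of repeatedly re-splitting the shrinking string once per delimiter, B makes one pass over the delimiters computing the earliest find() index into the original string (ignoring -1) and slices once at that minimum.
-- intended difference: On strings where the first occurrence of the Original-message marker overlaps the start of the first occurrence of the Forwarded-message marker (and no later delimiter occurs at or before it), A's first cut destroys the Original-message marker and A returns a prefix still containing the partial marker, while B cuts at the earlier Original-message position, which is the intended behaviour of stripping at the earliest marker. — e.g. on strip_old(some "-----Original message---------- Forwarded message ----------"): A returns some "-----Original message\n", B returns some "\n"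
import Mathlib
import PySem

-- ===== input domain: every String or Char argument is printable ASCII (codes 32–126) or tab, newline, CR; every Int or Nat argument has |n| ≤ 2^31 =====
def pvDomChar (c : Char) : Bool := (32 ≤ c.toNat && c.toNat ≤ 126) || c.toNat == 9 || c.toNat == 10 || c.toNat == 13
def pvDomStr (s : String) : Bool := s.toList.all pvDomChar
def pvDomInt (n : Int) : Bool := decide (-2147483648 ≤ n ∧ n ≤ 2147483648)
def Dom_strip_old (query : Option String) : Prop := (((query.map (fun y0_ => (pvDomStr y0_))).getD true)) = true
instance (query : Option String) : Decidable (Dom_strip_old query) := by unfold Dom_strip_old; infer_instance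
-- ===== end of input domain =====

-- B replaces A's repeated re-splitting of the shrinking string by one pass taking the minimum
-- find() index over the delimiters and a single slice (objective: simpler).

-- ===== PORT A =====
-- the delimiter list (module-level constant shared by both ports)
def strip_params_strip_old : List String :=
  ["---------- Forwarded message ----------",
   "-----Original message-----",
   "wrote:",
   "________________________________________",
   "Quoting",
   "\r\n>",
   "\n>",
   "From:"]

def strip_old (query : Option String) : Option String :=
  let strip_params := strip_params_strip_old
  match query with
  | none => none
  | some q =>
      -- query = query.split(param)[0]; every param is nonempty so split? returns some,
      -- and split always yields a nonempty list so index 0 is total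
      let q := strip_params.foldl
        (fun s param => PySem.List.pyGetD ((PySem.Str.split? s param).getD []) 0 "") q
      some (q ++ "\n")

-- ===== PORT B =====
def strip_old_alt (query : Option String) : Option String :=
  let strip_params := strip_params_strip_old
  match query with
  | none => none
  | some q =>
      let cut := strip_params.foldl
        (fun cut param =>
          let i := PySem.Str.find q param
          if i ≠ -1 ∧ i < cut then i else cut)
        (PySem.Str.len q)
      some (PySem.Str.slice q none (some cut) ++ "\n")

-- ===== PRECONDITION & SPEC =====
-- On strings where the first occurrence of the Original-message marker overlaps the start of the
-- first occurrence of the Forwarded-message marker (and no later delimiter occurs at or before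
-- it), A's first cut destroys the Original-message marker and A keeps the partial marker, while
-- B cuts at the earlier Original-message position — the intended earliest-marker cut.
def D_strip_old (query : Option String) : Prop :=
  let f := PySem.Str.find query.iget
  let i := f "-----Original message-----"
  0 ≤ i ∧ i < f "---------- Forwarded message ----------" ∧
  f "---------- Forwarded message ----------" < i + 26 ∧
  ∀ r ∈ strip_params_strip_old.tail.tail, f r < 0 ∨ i < f r
instance (query : Option String) : Decidable (D_strip_old query) := by
  unfold D_strip_old; infer_instance

def Spec_strip_old (query : Option String) (out : Option String) : Prop :=
  ¬ D_strip_old query → out = strip_old_alt query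
instance (query : Option String) (out : Option String) : Decidable (Spec_strip_old query out) := by
  unfold Spec_strip_old; infer_instance

def pvDiffWitness_strip_old : Option String :=
  some "-----Original message---------- Forwarded message ----------"
def pvDiffWitnessOut_strip_old : (Option String) × (Option String) :=
  (some "-----Original message\n", some "\n")

-- ===== CLAIM (what is proved, stated in full; the proofs are below) =====
def Claim_unchanged_strip_old : Prop :=
  ∀ (query : Option String), Dom_strip_old query → Spec_strip_old query (strip_old query)
def Claim_changed_strip_old : Prop :=
  Dom_strip_old (pvDiffWitness_strip_old) ∧ D_strip_old (pvDiffWitness_strip_old) ∧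
  strip_old (pvDiffWitness_strip_old) = pvDiffWitnessOut_strip_old.1 ∧
  strip_old_alt (pvDiffWitness_strip_old) = pvDiffWitnessOut_strip_old.2 ∧
  pvDiffWitnessOut_strip_old.1 ≠ pvDiffWitnessOut_strip_old.2
def Claim_exact_strip_old : Prop :=
  ∀ (query : Option String), Dom_strip_old query → D_strip_old query →
    strip_old query ≠ strip_old_alt query

-- ===== LEMMAS AND PROOFS =====

-- first-occurrence index of sub in s, with "not found" mapped to s.length
def pvIdx (s sub : List Char) : Nat :=
  if PySem.Chars.find s sub = -1 then s.length else (PySem.Chars.find s sub).toNat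

def pvMin (s : List Char) (ps : List (List Char)) : Nat :=
  ps.foldr (fun p m => min (pvIdx s p) m) s.length

-- no nonempty proper suffix of q matches against a prefix of p (so an occurrence of q can
-- never cross a cut made at an occurrence of p)
def pvNoCross (p q : List Char) : Prop :=
  ∀ t < q.length, 0 < t → ¬ q.drop t <+: p ∧ ¬ p <+: q.drop t

-- A's per-delimiter step at the List Char level
def pvCutA (s p : List Char) : List Char :=
  PySem.List.pyGetD ((PySem.Chars.split? s p).getD []) 0 []

theorem pvIdx_le (s sub : List Char) : pvIdx s sub ≤ s.length := by
  unfold pvIdx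
  split
  · exact le_rfl
  · rename_i h
    have h1 := PySem.Chars.find_le_length s sub
    have h2 := PySem.Chars.neg_one_le_find s sub
    omega

theorem pv_found {s sub : List Char} (h : pvIdx s sub < s.length) :
    sub <+: s.drop (pvIdx s sub) := by
  unfold pvIdx at *
  split at h
  · omega
  · rename_i hne
    have h0 : (0:Int) ≤ PySem.Chars.find s sub := by
      have := PySem.Chars.neg_one_le_find s sub; omega
    simpa [hne] using (PySem.Chars.find_spec h0).1

theorem pv_not_before {s sub : List Char} (k : Nat) (h : k < pvIdx s sub) :
    ¬ sub <+: s.drop k := by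
  intro hpre
  unfold pvIdx at h
  split at h
  · rename_i hneg
    have : sub <:+: s := by
      have hd : s.drop k = sub ++ (s.drop k).drop sub.length := by
        obtain ⟨r, hr⟩ := hpre
        simp [← hr]
      refine ⟨s.take k, (s.drop k).drop sub.length, ?_⟩
      rw [List.append_assoc, ← hd]
      simp
    exact ((PySem.Chars.find_eq_neg_one_iff s sub).mp hneg) this
  · rename_i hne
    have h0 : (0:Int) ≤ PySem.Chars.find s sub := by
      have := PySem.Chars.neg_one_le_find s sub; omega
    exact (PySem.Chars.find_spec h0).2 k h hpre

theorem pv_occ_bound {s sub : List Char} {i : Nat} (hs : sub ≠ []) (h : sub <+: s.drop i) :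
    i + sub.length ≤ s.length := by
  have h1 : sub.length ≤ (s.drop i).length := h.length_le
  have h2 : i ≤ s.length := by
    by_contra hlt
    have : s.drop i = [] := by
      apply List.drop_eq_nil_of_le; omega
    rw [this] at h
    exact hs (List.prefix_nil.mp h)
  simp at h1
  omega

theorem pvIdx_eq {s sub : List Char} {i : Nat} (hle : i ≤ s.length)
    (hmin : ∀ k < i, ¬ sub <+: s.drop k)
    (hocc : sub <+: s.drop i ∨ i = s.length) : pvIdx s sub = i := by
  rcases Nat.lt_trichotomy (pvIdx s sub) i with h | h | h
  · exact absurd (pv_found (lt_of_lt_of_le h hle)) (hmin _ h)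
  · exact h
  · rcases hocc with hocc | hocc
    · exact absurd hocc (pv_not_before i h)
    · have := pvIdx_le s sub; omega

theorem pvIdx_nil {sub : List Char} (_h : sub ≠ []) : pvIdx [] sub = 0 := by
  have := pvIdx_le [] sub; simpa using this

theorem pvIdx_of_prefix {l sub : List Char} (h : sub <+: l) : pvIdx l sub = 0 := by
  exact pvIdx_eq (Nat.zero_le _) (by omega) (Or.inl (by simpa using h))

theorem pvIdx_cons {c : Char} {rest sub : List Char} (_hsub : sub ≠ [])
    (hnp : ¬ sub <+: (c :: rest)) : pvIdx (c :: rest) sub = pvIdx rest sub + 1 := by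
  apply pvIdx_eq
  · have := pvIdx_le rest sub; simp; omega
  · intro k hk
    match k with
    | 0 => simpa using hnp
    | k' + 1 =>
      simp only [List.drop_succ_cons]
      exact pv_not_before k' (by omega)
  · rcases Nat.lt_or_ge (pvIdx rest sub) rest.length with h | h
    · exact Or.inl (by simpa using pv_found h)
    · have := pvIdx_le rest sub
      right; simp; omega

-- an occurrence of r cannot cross a cut position c at which q occurs, if pvNoCross q r
theorem pv_not_cross_occ {s q r : List Char} {c : Nat} (_hr : r ≠ [])
    (hocc : q <+: s.drop c) (hc : c ≤ s.length) (hnc : pvNoCross q r) :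
    ¬ (pvIdx s r < c ∧ c < pvIdx s r + r.length) := by
  rintro ⟨h1, h2⟩
  have hk : pvIdx s r < s.length := lt_of_lt_of_le h1 hc
  have hoccr : r <+: s.drop (pvIdx s r) := pv_found hk
  set k := pvIdx s r with hkdef
  have ht1 : 0 < c - k := by omega
  have ht2 : c - k < r.length := by omega
  have hdropped : r.drop (c - k) <+: s.drop c := by
    have h3 := hoccr.drop (c - k)
    rw [List.drop_drop] at h3
    have h4 : k + (c - k) = c := by omega
    rwa [h4] at h3
  rcases List.prefix_or_prefix_of_prefix hdropped hocc with h | h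
  · exact (hnc (c - k) ht2 ht1).1 h
  · exact (hnc (c - k) ht2 ht1).2 h

theorem pv_not_cross_len {s r : List Char} {c : Nat} (hc : c = s.length) :
    ¬ (pvIdx s r < c ∧ c < pvIdx s r + r.length) := by
  rintro ⟨h1, h2⟩
  subst hc
  by_cases hr : r = []
  · subst hr; simp at h2; omega
  · have := pv_occ_bound hr (pv_found h1); omega

-- index of the first occurrence in a truncation, when no occurrence crosses the cut
theorem pvIdx_take {s q : List Char} {c : Nat} (_hq : q ≠ []) (hc : c ≤ s.length)
    (hcross : ¬ (pvIdx s q < c ∧ c < pvIdx s q + q.length)) :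
    pvIdx (s.take c) q = min c (pvIdx s q) := by
  have hlen : (s.take c).length = c := by simp; omega
  rcases Nat.lt_or_ge (pvIdx s q) c with hlt | hge
  · -- q's first occurrence fits strictly inside the cut
    have hfit : pvIdx s q + q.length ≤ c := by omega
    have hocc : q <+: s.drop (pvIdx s q) := pv_found (lt_of_lt_of_le hlt hc)
    have : pvIdx (s.take c) q = pvIdx s q := by
      apply pvIdx_eq (by omega)
      · intro k hk hpre
        rw [List.drop_take] at hpre
        exact pv_not_before k hk ((hpre.trans (List.take_prefix _ _)))
      · left
        rw [List.drop_take]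
        exact List.prefix_take_iff.mpr ⟨hocc, by omega⟩
    omega
  · -- no occurrence of q inside the cut at all
    have : pvIdx (s.take c) q = c := by
      apply pvIdx_eq (by omega)
      · intro k hk hpre
        rw [List.drop_take] at hpre
        exact pv_not_before k (by omega) ((hpre.trans (List.take_prefix _ _)))
      · right; omega
    omega

theorem pvIdx_take_ge {s q : List Char} {c : Nat} (hc : c ≤ s.length) :
    min c (pvIdx s q) ≤ pvIdx (s.take c) q := by
  have hlen : (s.take c).length = c := by simp; omega
  rcases Nat.lt_or_ge (pvIdx (s.take c) q) (s.take c).length with hlt | hge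
  · have hocc : q <+: (s.take c).drop (pvIdx (s.take c) q) := pv_found hlt
    rw [List.drop_take] at hocc
    have hocc' : q <+: s.drop (pvIdx (s.take c) q) := hocc.trans (List.take_prefix _ _)
    by_contra hcon
    exact pv_not_before _ (by omega) hocc'
  · omega

theorem pv_foldr_min_map {ps : List (List Char)} {j b : Nat}
    (f g : List Char → Nat) (hfg : ∀ q ∈ ps, g q = min j (f q)) :
    ps.foldr (fun q m => min (g q) m) (min j b) =
      min j (ps.foldr (fun q m => min (f q) m) b) := by
  induction ps with
  | nil => rfl
  | cons p ps ih =>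
    simp only [List.foldr_cons]
    rw [ih (fun q hq => hfg q (List.mem_cons_of_mem _ hq)),
        hfg p (List.mem_cons_self)]
    omega

theorem pv_foldr_min_pull (ps : List (List Char)) (f : List Char → Nat) (a b : Nat) :
    ps.foldr (fun q m => min (f q) m) (min a b) =
      min a (ps.foldr (fun q m => min (f q) m) b) := by
  induction ps with
  | nil => rfl
  | cons p ps ih => simp only [List.foldr_cons]; rw [ih]; omega

theorem pvMin_take {s : List Char} {ps : List (List Char)} {c : Nat} (hc : c ≤ s.length)
    (h : ∀ q ∈ ps, q ≠ [] ∧ ¬ (pvIdx s q < c ∧ c < pvIdx s q + q.length)) :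
    pvMin (s.take c) ps = min c (pvMin s ps) := by
  unfold pvMin
  have hlen : (s.take c).length = c := by simp; omega
  rw [hlen]
  have h2 := pv_foldr_min_map (ps := ps) (j := c) (b := s.length)
    (pvIdx s) (pvIdx (s.take c))
    (fun q hq => pvIdx_take (h q hq).1 hc (h q hq).2)
  rw [show min c s.length = c from by omega] at h2
  exact h2

-- splitOn.go unfolding equations
theorem pv_go_zero (sep l cur : List Char) (acc : List (List Char)) :
    PySem.Chars.splitOn.go sep 0 l cur acc = ((cur.reverse ++ l) :: acc).reverse := by
  rw [PySem.Chars.splitOn.go]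

theorem pv_go_nil (sep cur : List Char) (acc : List (List Char)) (fuel : Nat) :
    PySem.Chars.splitOn.go sep (fuel + 1) [] cur acc = (cur.reverse :: acc).reverse := by
  rw [PySem.Chars.splitOn.go]
  intro h; omega

theorem pv_go_cons (sep cur : List Char) (acc : List (List Char)) (fuel : Nat)
    (c : Char) (rest : List Char) :
    PySem.Chars.splitOn.go sep (fuel + 1) (c :: rest) cur acc =
      if sep.isPrefixOf (c :: rest) then
        PySem.Chars.splitOn.go sep fuel (List.drop sep.length (c :: rest)) [] (cur.reverse :: acc)
      else PySem.Chars.splitOn.go sep fuel rest (c :: cur) acc := by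
  rw [PySem.Chars.splitOn.go]

-- splitOn.go: the accumulator factors out
theorem pv_go_acc (sep : List Char) :
    ∀ (fuel : Nat) (l cur : List Char) (acc : List (List Char)),
      PySem.Chars.splitOn.go sep fuel l cur acc =
        acc.reverse ++ PySem.Chars.splitOn.go sep fuel l cur [] := by
  intro fuel
  induction fuel with
  | zero => intro l cur acc; rw [pv_go_zero, pv_go_zero]; simp
  | succ fuel ih =>
    intro l cur acc
    match l with
    | [] => rw [pv_go_nil, pv_go_nil]; simp
    | c :: rest =>
      rw [pv_go_cons, pv_go_cons]
      by_cases hpre : sep.isPrefixOf (c :: rest)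
      · rw [if_pos hpre, if_pos hpre, ih _ _ (cur.reverse :: acc), ih _ _ [cur.reverse]]
        simp
      · rw [if_neg hpre, if_neg hpre, ih]

theorem pv_go_head (sep : List Char) (hsep : sep ≠ []) :
    ∀ (fuel : Nat) (l cur : List Char), l.length < fuel →
      PySem.List.pyGetD (PySem.Chars.splitOn.go sep fuel l cur []) 0 [] =
        cur.reverse ++ l.take (pvIdx l sep) := by
  intro fuel
  induction fuel with
  | zero => intro l cur h; omega
  | succ fuel ih =>
    intro l cur h
    match l with
    | [] =>
      rw [pv_go_nil, pvIdx_nil hsep]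
      simp [PySem.List.pyGetD_zero]
    | c :: rest =>
      rw [pv_go_cons]
      by_cases hpre : sep.isPrefixOf (c :: rest)
      · rw [if_pos hpre, pv_go_acc,
            pvIdx_of_prefix (List.isPrefixOf_iff_prefix.mp hpre)]
        simp [PySem.List.pyGetD_zero]
      · rw [if_neg hpre, ih rest (c :: cur) (by simp at h; omega),
            pvIdx_cons hsep (fun hp => hpre (List.isPrefixOf_iff_prefix.mpr hp))]
        simp

theorem pv_cutA_eq {s p : List Char} (hp : p ≠ []) :
    pvCutA s p = s.take (pvIdx s p) := by
  unfold pvCutA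
  rw [show PySem.Chars.split? s p = some (PySem.Chars.splitOn s p) from by
        simp [PySem.Chars.split?, List.isEmpty_iff, hp]]
  unfold PySem.Chars.splitOn
  rw [show s.length + 1 = s.length + 1 from rfl]
  have := pv_go_head p hp (s.length + 1) s [] (by omega)
  simpa using this

-- A's fold over a pairwise non-crossing delimiter list cuts at the minimum index
theorem pv_foldA_eq :
    ∀ (ps : List (List Char)) (s : List Char), ps.Pairwise pvNoCross →
      (∀ p ∈ ps, p ≠ []) → List.foldl pvCutA s ps = s.take (pvMin s ps) := by
  intro ps
  induction ps with
  | nil => intro s _ _; simp [pvMin]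
  | cons p ps ih =>
    intro s hpw hne
    have hp : p ≠ [] := hne p List.mem_cons_self
    have hpq : ∀ q ∈ ps, pvNoCross p q := fun q hq => (List.pairwise_cons.mp hpw).1 q hq
    have hj := pvIdx_le s p
    rw [List.foldl_cons, pv_cutA_eq hp,
        ih _ (List.pairwise_cons.mp hpw).2 (fun q hq => hne q (List.mem_cons_of_mem _ hq))]
    have hmt : pvMin (s.take (pvIdx s p)) ps = min (pvIdx s p) (pvMin s ps) := by
      apply pvMin_take hj
      intro q hq
      refine ⟨hne q (List.mem_cons_of_mem _ hq), ?_⟩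
      rcases Nat.lt_or_ge (pvIdx s p) s.length with hlt | hge
      · exact pv_not_cross_occ (hne q (List.mem_cons_of_mem _ hq)) (pv_found hlt) hj (hpq q hq)
      · exact pv_not_cross_len (by omega)
    rw [hmt, List.take_take]
    have : min (min (pvIdx s p) (pvMin s ps)) (pvIdx s p) = min (pvIdx s p) (pvMin s ps) := by
      omega
    rw [this]
    rfl

-- B's fold computes the minimum index
theorem pv_foldB_eq (s : List Char) :
    ∀ (ps : List (List Char)) (c : Nat), c ≤ s.length →
      List.foldl (fun cut p =>
          let i := PySem.Chars.find s p
          if i ≠ -1 ∧ i < cut then i else cut) (c : Int) ps =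
        ((ps.foldr (fun p m => min (pvIdx s p) m) c : Nat) : Int) := by
  intro ps
  induction ps with
  | nil => intro c _; rfl
  | cons p ps ih =>
    intro c hc
    rw [List.foldl_cons]
    have hstep :
        (let i := PySem.Chars.find s p
         if i ≠ -1 ∧ i < (c : Int) then i else (c : Int)) =
          ((min (pvIdx s p) c : Nat) : Int) := by
      simp only []
      by_cases hfind : PySem.Chars.find s p = -1
      · rw [if_neg (by simp [hfind])]
        unfold pvIdx
        rw [if_pos hfind]
        omega
      · have h0 : (0 : Int) ≤ PySem.Chars.find s p := by
          have := PySem.Chars.neg_one_le_find s p; omega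
        unfold pvIdx
        rw [if_neg hfind]
        by_cases hlt : PySem.Chars.find s p < (c : Int)
        · rw [if_pos ⟨hfind, hlt⟩]; omega
        · rw [if_neg (by tauto)]; omega
    rw [hstep, ih (min (pvIdx s p) c) (by have := pvIdx_le s p; omega),
        List.foldr_cons, pv_foldr_min_pull]


-- the concrete delimiters at the List Char level
def pvP0 : List Char := "---------- Forwarded message ----------".toList
def pvQ1 : List Char := "-----Original message-----".toList
def pvR6 : List (List Char) :=
  ["wrote:".toList, "________________________________________".toList,
   "Quoting".toList, "\r\n>".toList, "\n>".toList, "From:".toList]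

-- A's cut position and B's cut position as functions of the character list
def pvMA (s : List Char) : Nat :=
  min (pvIdx (s.take (pvIdx s pvP0)) pvQ1) (min (pvIdx s pvP0) (pvMin s pvR6))
def pvMB (s : List Char) : Nat :=
  min (pvIdx s pvP0) (min (pvIdx s pvQ1) (pvMin s pvR6))

theorem pv_nc_P0 : ∀ r ∈ pvR6, pvNoCross pvP0 r := by
  simp only [pvNoCross, pvP0, pvR6]; decide

theorem pv_nc_Q1 : ∀ r ∈ pvR6, pvNoCross pvQ1 r := by
  simp only [pvNoCross, pvQ1, pvR6]; decide

theorem pv_pw_R6 : pvR6.Pairwise pvNoCross := by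
  show pvR6.Pairwise (fun p q => pvNoCross p q)
  simp only [pvNoCross, pvR6]
  decide

theorem pv_ne_R6 : ∀ r ∈ pvR6, r ≠ [] := by decide

theorem pv_lt_min {s : List Char} {ps : List (List Char)} {i : Nat} (hlen : i < s.length)
    (h : ∀ r ∈ ps, i < pvIdx s r) : i < pvMin s ps := by
  induction ps with
  | nil => simpa [pvMin] using hlen
  | cons p ps ih =>
    have h1 := h p List.mem_cons_self
    have h2 := ih (fun r hr => h r (List.mem_cons_of_mem _ hr))
    simp only [pvMin, List.foldr_cons] at h2 ⊢
    omega

theorem pv_min_lt {s : List Char} {ps : List (List Char)} {i : Nat}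
    (h : i < pvMin s ps) : ∀ r ∈ ps, i < pvIdx s r := by
  induction ps with
  | nil => simp
  | cons p ps ih =>
    intro r hr
    simp only [pvMin, List.foldr_cons] at h
    rcases List.mem_cons.mp hr with hr | hr
    · subst hr; omega
    · exact ih (by simp only [pvMin]; omega) r hr

-- A's string fold is the chars fold
theorem pv_foldA_bridge :
    ∀ (ps : List String) (q : String), (∀ p ∈ ps, p.toList ≠ []) →
      (List.foldl (fun s param => PySem.List.pyGetD ((PySem.Str.split? s param).getD []) 0 "") q ps).toList
        = List.foldl pvCutA q.toList (ps.map String.toList) := by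
  intro ps
  induction ps with
  | nil => intro q _; rfl
  | cons p ps ih =>
    intro q hne
    rw [List.foldl_cons, List.map_cons, List.foldl_cons,
        ih _ (fun p hp => hne p (List.mem_cons_of_mem _ hp))]
    congr 1
    have hp : p.toList ≠ [] := hne p List.mem_cons_self
    rw [PySem.Str.split?]
    rw [show PySem.Chars.split? q.toList p.toList = some (PySem.Chars.splitOn q.toList p.toList) from by
          simp [PySem.Chars.split?, List.isEmpty_iff, hp]]
    simp only [Option.map_some, Option.getD_some]
    rw [PySem.List.pyGetD_zero, show ("" : String) = String.ofList [] from rfl, List.getD_map]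
    rw [String.toList_ofList]
    unfold pvCutA
    rw [show PySem.Chars.split? q.toList p.toList = some (PySem.Chars.splitOn q.toList p.toList) from by
          simp [PySem.Chars.split?, List.isEmpty_iff, hp]]
    simp only [Option.getD_some]
    rw [PySem.List.pyGetD_zero]

-- B's string fold is the chars fold
theorem pv_foldB_bridge (q : String) :
    ∀ (ps : List String) (c : Int),
      List.foldl (fun cut param =>
          let i := PySem.Str.find q param
          if i ≠ -1 ∧ i < cut then i else cut) c ps
        = List.foldl (fun cut p =>
          let i := PySem.Chars.find q.toList p
          if i ≠ -1 ∧ i < cut then i else cut) c (ps.map String.toList) := by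
  intro ps
  induction ps with
  | nil => intro c; rfl
  | cons p ps ih =>
    intro c
    rw [List.foldl_cons, List.map_cons, List.foldl_cons, ih]
    simp only [PySem.Str.find_eq]

theorem pv_A_val (q : String) :
    strip_old (some q) = some (String.ofList (q.toList.take (pvMA q.toList)) ++ "\n") := by
  have h0 : strip_old (some q) =
      some (strip_params_strip_old.foldl
        (fun s param => PySem.List.pyGetD ((PySem.Str.split? s param).getD []) 0 "") q ++ "\n") := rfl
  rw [h0]
  refine congrArg some (String.toList_inj.mp ?_)
  rw [String.toList_append, String.toList_append, String.toList_ofList]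
  suffices h : (strip_params_strip_old.foldl
      (fun s param => PySem.List.pyGetD ((PySem.Str.split? s param).getD []) 0 "") q).toList
      = q.toList.take (pvMA q.toList) by rw [h, String.toList_ofList]
  rw [pv_foldA_bridge _ _ (by decide)]
  rw [show (strip_params_strip_old.map String.toList) = pvP0 :: pvQ1 :: pvR6 from rfl]
  -- peel the first two delimiters, then use the pairwise lemma on the remaining six
  set s := q.toList with hs
  have hj0 := pvIdx_le s pvP0
  have hQ1ne : pvQ1 ≠ [] := by decide
  have hP0ne : pvP0 ≠ [] := by decide
  rw [List.foldl_cons, List.foldl_cons, pv_cutA_eq hP0ne, pv_cutA_eq hQ1ne,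
      pv_foldA_eq pvR6 _ pv_pw_R6 pv_ne_R6]
  set j0 := pvIdx s pvP0 with hj0d
  set s1 := s.take j0 with hs1
  set i2 := pvIdx s1 pvQ1 with hi2
  have hlen1 : s1.length = j0 := by rw [hs1]; simp; omega
  have hi2le : i2 ≤ j0 := by have := pvIdx_le s1 pvQ1; omega
  have hm1 : pvMin s1 pvR6 = min j0 (pvMin s pvR6) := by
    apply pvMin_take hj0
    intro r hr
    refine ⟨pv_ne_R6 r hr, ?_⟩
    rcases Nat.lt_or_ge j0 s.length with hlt | hge
    · exact pv_not_cross_occ (pv_ne_R6 r hr) (pv_found hlt) hj0 (pv_nc_P0 r hr)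
    · exact pv_not_cross_len (by omega)
  have hm2 : pvMin (s1.take i2) pvR6 = min i2 (pvMin s1 pvR6) := by
    apply pvMin_take (by omega)
    intro r hr
    refine ⟨pv_ne_R6 r hr, ?_⟩
    rcases Nat.lt_or_ge i2 s1.length with hlt | hge
    · exact pv_not_cross_occ (pv_ne_R6 r hr) (pv_found hlt) (by omega) (pv_nc_Q1 r hr)
    · exact pv_not_cross_len (by omega)
  rw [hm2, hm1, hs1, List.take_take, List.take_take]
  have harith : min (min (min i2 (min j0 (pvMin s pvR6))) i2) j0 = pvMA s := by
    unfold pvMA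
    rw [← hj0d, ← hs1, ← hi2]
    omega
  rw [harith]

theorem pv_B_val (q : String) :
    strip_old_alt (some q) = some (String.ofList (q.toList.take (pvMB q.toList)) ++ "\n") := by
  have h0 : strip_old_alt (some q) =
      some (PySem.Str.slice q none
        (some (strip_params_strip_old.foldl
          (fun cut param =>
            let i := PySem.Str.find q param
            if i ≠ -1 ∧ i < cut then i else cut) (PySem.Str.len q))) ++ "\n") := rfl
  rw [h0]
  refine congrArg some (String.toList_inj.mp ?_)
  rw [String.toList_append, String.toList_append, String.toList_ofList]
  suffices h : (PySem.Str.slice q none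
      (some (strip_params_strip_old.foldl
        (fun cut param =>
          let i := PySem.Str.find q param
          if i ≠ -1 ∧ i < cut then i else cut) (PySem.Str.len q)))).toList
      = q.toList.take (pvMB q.toList) by rw [h, String.toList_ofList]
  rw [pv_foldB_bridge]
  rw [show (strip_params_strip_old.map String.toList) = pvP0 :: pvQ1 :: pvR6 from rfl]
  rw [PySem.Str.len_eq]
  rw [pv_foldB_eq q.toList (pvP0 :: pvQ1 :: pvR6) q.toList.length le_rfl]
  rw [PySem.Str.toList_slice, PySem.Chars.slice_eq_listSlice]
  have hsl := PySem.List.slice_to (xs := q.toList)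
    (b := ((List.foldr (fun p m => min (pvIdx q.toList p) m) q.toList.length
      (pvP0 :: pvQ1 :: pvR6) : Nat) : Int)) (Int.natCast_nonneg _)
  rw [hsl, Int.toNat_natCast]
  simp only [pvMB, pvMin, List.foldr_cons]

theorem pv_find_nonneg_iff_idx {s sub : List Char} (hsub : sub ≠ []) :
    0 ≤ PySem.Chars.find s sub ↔ pvIdx s sub < s.length := by
  constructor
  · intro h
    have hne : PySem.Chars.find s sub ≠ -1 := by omega
    have hidx : pvIdx s sub = (PySem.Chars.find s sub).toNat := by
      unfold pvIdx; rw [if_neg hne]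
    have hocc := (PySem.Chars.find_spec h).1
    have := pv_occ_bound hsub (by rw [← hidx] at hocc; exact hocc)
    have hlen : 0 < sub.length := List.length_pos_iff.mpr hsub
    omega
  · intro h
    by_contra hneg
    have hne : PySem.Chars.find s sub = -1 := by
      have := PySem.Chars.neg_one_le_find s sub; omega
    unfold pvIdx at h
    rw [if_pos hne] at h
    omega

theorem pv_find_eq_idx {s sub : List Char} (h : 0 ≤ PySem.Chars.find s sub) :
    PySem.Chars.find s sub = (pvIdx s sub : Int) := by
  have hne : PySem.Chars.find s sub ≠ -1 := by omega
  unfold pvIdx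
  rw [if_neg hne]
  omega

theorem pv_D_iff (q : String) :
    D_strip_old (some q) ↔
      (pvIdx q.toList pvQ1 < pvIdx q.toList pvP0 ∧
       pvIdx q.toList pvP0 < pvIdx q.toList pvQ1 + 26 ∧
       pvIdx q.toList pvQ1 < pvMin q.toList pvR6) := by
  unfold D_strip_old
  simp only [PySem.Str.find_eq,
    show strip_params_strip_old.tail.tail = (["wrote:", "________________________________________",
      "Quoting", "\r\n>", "\n>", "From:"] : List String) from rfl]
  rw [show "-----Original message-----".toList = pvQ1 from rfl,
      show "---------- Forwarded message ----------".toList = pvP0 from rfl]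
  set s := q.toList with hs
  have hQne : pvQ1 ≠ [] := by decide
  have hPne : pvP0 ≠ [] := by decide
  constructor
  · rintro ⟨h0i, hij, hj26, hrest⟩
    have hilen : pvIdx s pvQ1 < s.length := (pv_find_nonneg_iff_idx hQne).mp h0i
    have hfi := pv_find_eq_idx h0i
    have h0j : 0 ≤ PySem.Chars.find s pvP0 := by omega
    have hfj := pv_find_eq_idx h0j
    refine ⟨by omega, by omega, ?_⟩
    apply pv_lt_min hilen
    intro r hr
    rw [show pvR6 = (["wrote:", "________________________________________",
        "Quoting", "\r\n>", "\n>", "From:"] : List String).map String.toList from rfl] at hr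
    obtain ⟨rs, hrs, hrt⟩ := List.mem_map.mp hr
    subst hrt
    have hd := hrest rs hrs
    by_cases h0r : 0 ≤ PySem.Chars.find s rs.toList
    · have hfr := pv_find_eq_idx h0r
      omega
    · have hne : PySem.Chars.find s rs.toList = -1 := by
        have := PySem.Chars.neg_one_le_find s rs.toList; omega
      have hre : pvIdx s rs.toList = s.length := by
        unfold pvIdx; rw [if_pos hne]
      omega
  · rintro ⟨h1, h2, h3⟩
    have hj0 := pvIdx_le s pvP0
    have hQ1len : pvQ1.length = 26 := by decide
    have hilen : pvIdx s pvQ1 < s.length := by omega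
    have hjlen : pvIdx s pvP0 < s.length := by
      have hocc := pv_found hilen
      have := pv_occ_bound hQne hocc
      omega
    have h0i : 0 ≤ PySem.Chars.find s pvQ1 := (pv_find_nonneg_iff_idx hQne).mpr hilen
    have h0j : 0 ≤ PySem.Chars.find s pvP0 := (pv_find_nonneg_iff_idx hPne).mpr hjlen
    have hfi := pv_find_eq_idx h0i
    have hfj := pv_find_eq_idx h0j
    refine ⟨h0i, by omega, by omega, ?_⟩
    intro r hr
    have hmem : r.toList ∈ pvR6 := by
      rw [show pvR6 = (["wrote:", "________________________________________",
          "Quoting", "\r\n>", "\n>", "From:"] : List String).map String.toList from rfl]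
      exact List.mem_map_of_mem hr
    have hlt := pv_min_lt h3 r.toList hmem
    by_cases h0r : 0 ≤ PySem.Chars.find s r.toList
    · have hfr := pv_find_eq_idx h0r
      right; omega
    · left; omega

theorem strip_old_spec : Claim_unchanged_strip_old := by
  intro query _ hnD
  match query with
  | none => rfl
  | some q =>
    rw [pv_A_val, pv_B_val]
    rw [pv_D_iff] at hnD
    set s := q.toList with hs
    set i := pvIdx s pvQ1 with hi
    set j0 := pvIdx s pvP0 with hj0d
    set M6 := pvMin s pvR6 with hM6
    have hQ1len : pvQ1.length = 26 := by decide
    have hj0 := pvIdx_le s pvP0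
    have hlen1 : (s.take j0).length = j0 := by simp; omega
    have hge : min j0 i ≤ pvIdx (s.take j0) pvQ1 := pvIdx_take_ge hj0
    have hle2 : pvIdx (s.take j0) pvQ1 ≤ j0 := by
      have := pvIdx_le (s.take j0) pvQ1; omega
    have hm : pvMA s = pvMB s := by
      unfold pvMA pvMB
      rw [← hi, ← hj0d, ← hM6]
      by_cases hcross : i < j0 ∧ j0 < i + 26
      · have hM6i : M6 ≤ i := by omega
        omega
      · have heq2 : pvIdx (s.take j0) pvQ1 = min j0 i := by
          apply pvIdx_take (by decide) hj0
          rw [← hi, ← hj0d, hQ1len]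
          omega
        omega
    rw [hm]
set_option maxRecDepth 100000 in
set_option maxHeartbeats 1000000 in
theorem strip_old_changed : Claim_changed_strip_old := by
  unfold Claim_changed_strip_old; decide
theorem strip_old_tight : Claim_exact_strip_old := by
  intro query _ hD
  match query with
  | none => exact absurd hD (by decide)
  | some q =>
    obtain ⟨h1, h2, h3⟩ := (pv_D_iff q).mp hD
    rw [pv_A_val, pv_B_val]
    intro heq
    set s := q.toList with hs
    set i := pvIdx s pvQ1 with hi
    set j0 := pvIdx s pvP0 with hj0d
    set M6 := pvMin s pvR6 with hM6
    have hQ1len : pvQ1.length = 26 := by decide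
    have hj0 := pvIdx_le s pvP0
    have hlen1 : (s.take j0).length = j0 := by simp; omega
    have hge : min j0 i ≤ pvIdx (s.take j0) pvQ1 := pvIdx_take_ge hj0
    have hilen : i < s.length := by omega
    -- the truncation destroys the crossing occurrence, so A's index is strictly later
    have hne : pvIdx (s.take j0) pvQ1 ≠ i := by
      intro hcon
      have hlt : pvIdx (s.take j0) pvQ1 < (s.take j0).length := by omega
      have hocc := pv_found hlt
      rw [List.drop_take] at hocc
      have := (List.prefix_take_iff.mp hocc).2
      omega
    have hi2 : i < pvIdx (s.take j0) pvQ1 := by omega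
    -- equal outputs would force equal cut lengths
    injection heq with hsome
    have hlists := congrArg String.toList hsome
    simp only [String.toList_append, String.toList_ofList] at hlists
    have hlen := congrArg List.length hlists
    simp only [List.length_append, List.length_take] at hlen
    have hMA : i < pvMA s := by
      unfold pvMA
      rw [← hj0d]
      omega
    have hMB : pvMB s = i := by
      unfold pvMB
      rw [← hj0d, ← hi, ← hM6]
      omega
    rw [hMB] at hlen
    omega
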